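-- pv_equiv track=rewrite | github.com/QuocVoong/R-Study-Lists | Bioinformatics-Introduction and Methods & Algorithms, Biology, and Programming for Beginners/BioinformPart1/week1/frequent_words_with_mismatches/freqwords_mismatch.3.py | mutate_kmer
-- ===== SOURCE A (Python) =====
-- def mutate_kmer(pattern, matrix, index):
--     if index == len(pattern) - 1:
--         if pattern[index] == 'n':
--             for b in ['A', 'T', 'C', 'G']:
--                 if matrix.get(b)[index] != 0:
--                     yield b
--         else:
--             yield pattern[index]
--     else:
--         if pattern[index] == 'n':
--             for b in ['A', 'T', 'C', 'G']:
--                 if matrix.get(b)[index] != 0: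
--                     for i in mutate_kmer(pattern, matrix, index + 1):
--                         yield b + i
--         else:
--             for i in mutate_kmer(pattern, matrix, index + 1):
--                 yield pattern[index] + i
-- ===== SOURCE B (Python) =====
-- def mutate_kmer(pattern, matrix, index):
--     # Iterative breadth-first prefix expansion instead of the recursive suffix generator;
--     # positions are scanned left to right so matrix entries are probed exactly where A probes them.
--     results = ['']
--     for p in range(index, len(pattern)):
--         if pattern[p] == 'n':
--             opts = [b for b in ['A', 'T', 'C', 'G'] if matrix.get(b)[p] != 0]
--         else:
--             opts = [pattern[p]]
--         results = [r + c for r in results for c in opts]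
--         if not results:
--             return
--     for r in results:
--         yield r
-- ===== Notes on version B (the rewrite author's own statement) =====
-- stated objective: alternative
-- what changed: Replaces A's recursive suffix generator (one generator frame per position, rebuilding suffixes along each branch) by a single iterative left-to-right pass that expands a list of prefixes by the choice list of each position, stopping as soon as the prefix list becomes empty; same strings in the same order.
import Mathlib
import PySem

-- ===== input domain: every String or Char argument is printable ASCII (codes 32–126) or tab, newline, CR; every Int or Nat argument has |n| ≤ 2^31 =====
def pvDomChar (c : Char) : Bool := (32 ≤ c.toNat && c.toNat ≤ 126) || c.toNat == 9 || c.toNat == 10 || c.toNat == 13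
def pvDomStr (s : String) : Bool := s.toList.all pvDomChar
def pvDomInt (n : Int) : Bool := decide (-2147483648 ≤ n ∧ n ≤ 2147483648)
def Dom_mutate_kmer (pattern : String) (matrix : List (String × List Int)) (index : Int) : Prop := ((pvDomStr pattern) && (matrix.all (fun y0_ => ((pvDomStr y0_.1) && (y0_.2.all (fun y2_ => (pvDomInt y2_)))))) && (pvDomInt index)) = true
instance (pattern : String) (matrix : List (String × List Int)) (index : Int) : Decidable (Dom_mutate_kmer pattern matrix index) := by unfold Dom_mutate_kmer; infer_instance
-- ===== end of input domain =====

-- B replaces A's recursive suffix generator by an iterative left-to-right prefix expansion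
-- (breadth-first product build); same strings in the same order (equivalence of return values).

-- shared helpers: the four bases and the Python expression `matrix.get(b)[p]`
-- (`.getD []` / `.getD 0` are defaults for the raising cases, which Pre_ excludes)
def pvBases : List String := ["A", "T", "C", "G"]

def pvEntry (matrix : List (String × List Int)) (b : String) (p : Int) : Int :=
  (PySem.List.pyGet? (((PySem.Dict.mk matrix).get? b).getD []) p).getD 0

-- ===== PORT A =====
-- A's generator, on `pattern.toList`; fuel bounds the recursion index → index+1 → … → len-1
def mutateGoA (cs : List Char) (matrix : List (String × List Int)) : Nat → Int → List (List Char)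
  | 0, _ => []
  | fuel + 1, index =>
    let c := (PySem.List.pyGet? cs index).getD '?'
    if index = (cs.length : Int) - 1 then
      if c = 'n' then
        (pvBases.filter (fun b => pvEntry matrix b index ≠ 0)).map String.toList
      else [[c]]
    else
      if c = 'n' then
        pvBases.foldl (fun acc b =>
          if pvEntry matrix b index ≠ 0 then
            acc ++ (mutateGoA cs matrix fuel (index + 1)).map (fun i => b.toList ++ i)
          else acc) []
      else (mutateGoA cs matrix fuel (index + 1)).map (fun i => c :: i)

def mutate_kmer (pattern : String) (matrix : List (String × List Int)) (index : Int) : List String :=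
  (mutateGoA pattern.toList matrix (((pattern.toList.length : Int) - index).toNat + 1) index).map
    (fun l => String.ofList l)

-- ===== PORT B =====
-- B's loop: for p in range(index, len(pattern)): expand `results` by the choice list at p
def mutateGoB (cs : List Char) (matrix : List (String × List Int)) :
    List Int → List (List Char) → List (List Char)
  | [], results => results
  | p :: ps, results =>
    let c := (PySem.List.pyGet? cs p).getD '?'
    let opts : List (List Char) :=
      if c = 'n' then (pvBases.filter (fun b => pvEntry matrix b p ≠ 0)).map String.toList
      else [[c]]
    let results' := results.flatMap (fun r => opts.map (fun o => r ++ o))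
    if results' = [] then [] else mutateGoB cs matrix ps results'

def mutate_kmer_alt (pattern : String) (matrix : List (String × List Int)) (index : Int) : List String :=
  (mutateGoB pattern.toList matrix
      (PySem.List.pyRange index (pattern.toList.length : Int) 1) [[]]).map
    (fun l => String.ofList l)

-- ===== PRECONDITION & SPEC =====
-- `matrix.get(b)[p]` succeeds in Python iff b is a key and p a valid (possibly negative) index
def pvOkB (matrix : List (String × List Int)) (b : String) (p : Int) : Bool :=
  match (PySem.Dict.mk matrix).get? b with
  | none => false
  | some v => decide (-(v.length : Int) ≤ p ∧ p < (v.length : Int))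

-- Pre_ = exactly the inputs on which Python A returns (yields a list) without raising:
-- index must be a valid (possibly negative) position of a nonempty pattern, and at every
-- position the recursion actually reaches (all earlier 'n' positions have a nonzero base)
-- that holds an 'n', all four matrix accesses must succeed.
def Pre_mutate_kmer (pattern : String) (matrix : List (String × List Int)) (index : Int) : Prop :=
  pattern.toList ≠ [] ∧
  -(pattern.toList.length : Int) ≤ index ∧ index ≤ (pattern.toList.length : Int) - 1 ∧
  ∀ p ∈ PySem.List.pyRange index (pattern.toList.length : Int) 1,
    (∀ q ∈ PySem.List.pyRange index p 1,
        (PySem.List.pyGet? pattern.toList q).getD '?' = 'n' →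
        ∃ b ∈ pvBases, pvEntry matrix b q ≠ 0) →
    (PySem.List.pyGet? pattern.toList p).getD '?' = 'n' →
    ∀ b ∈ pvBases, pvOkB matrix b p = true

instance (pattern : String) (matrix : List (String × List Int)) (index : Int) :
    Decidable (Pre_mutate_kmer pattern matrix index) := by
  unfold Pre_mutate_kmer; infer_instance

def pvWitness_mutate_kmer : String × (List (String × List Int)) × Int :=
  ("nA", [("A", [1, 0]), ("T", [0, 0]), ("C", [1, 1]), ("G", [0, 1])], 0)

def Spec_mutate_kmer (pattern : String) (matrix : List (String × List Int)) (index : Int) (out : List String) : Prop := out = mutate_kmer_alt pattern matrix index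
instance (pattern : String) (matrix : List (String × List Int)) (index : Int) (out : List String) : Decidable (Spec_mutate_kmer pattern matrix index out) := by unfold Spec_mutate_kmer; infer_instance

-- ===== CLAIM (what is proved, stated in full; the proofs are below) =====
def Claim_equal_mutate_kmer : Prop := ∀ (pattern : String) (matrix : List (String × List Int)) (index : Int), Dom_mutate_kmer pattern matrix index → Pre_mutate_kmer pattern matrix index → Spec_mutate_kmer pattern matrix index (mutate_kmer pattern matrix index)

-- ===== LEMMAS AND PROOFS =====

-- the choice list at position p (both ports compute exactly this expression)
def pvOpts (cs : List Char) (matrix : List (String × List Int)) (p : Int) : List (List Char) :=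
  if (PySem.List.pyGet? cs p).getD '?' = 'n' then
    (pvBases.filter (fun b => pvEntry matrix b p ≠ 0)).map String.toList
  else [(PySem.List.pyGet? cs p).getD '?' :: []]

lemma flatMap_filter_map {α β γ : Type} (l : List α) (p : α → Prop) [DecidablePred p]
    (f : α → β) (g : β → List γ) :
    ((l.filter (fun x => decide (p x))).map f).flatMap g =
      l.flatMap (fun x => if p x then g (f x) else []) := by
  induction l with
  | nil => simp
  | cons a l ih => by_cases h : p a <;> simp [h, ih]

lemma map_append_flatMap {α : Type} (r : List α) (opts rec : List (List α)) :
    (opts.map (fun o => r ++ o)).flatMap (fun r' => rec.map (fun i => r' ++ i)) =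
      (opts.flatMap (fun o => rec.map (fun i => o ++ i))).map (fun i => r ++ i) := by
  induction opts with
  | nil => simp
  | cons o os ih => simp [ih, List.map_map, Function.comp_def, List.append_assoc]

lemma flatMap_expand {α : Type} (results opts rec : List (List α)) :
    (results.flatMap (fun r => opts.map (fun o => r ++ o))).flatMap
        (fun r' => rec.map (fun i => r' ++ i)) =
      results.flatMap
        (fun r => (opts.flatMap (fun o => rec.map (fun i => o ++ i))).map (fun i => r ++ i)) := by
  induction results with
  | nil => simp
  | cons r rs ih => simp [ih, map_append_flatMap]

lemma mutateGoA_step (cs : List Char) (matrix : List (String × List Int)) (fuel : Nat)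
    (index : Int) (h : index ≠ (cs.length : Int) - 1) :
    mutateGoA cs matrix (fuel + 1) index =
      (pvOpts cs matrix index).flatMap
        (fun o => (mutateGoA cs matrix fuel (index + 1)).map (fun i => o ++ i)) := by
  rw [mutateGoA, if_neg h]
  by_cases hc : (PySem.List.pyGet? cs index).getD '?' = 'n'
  · rw [if_pos hc]
    have hfn : (fun (acc : List (List Char)) (b : String) =>
        if pvEntry matrix b index ≠ 0 then
          acc ++ (mutateGoA cs matrix fuel (index + 1)).map (fun i => b.toList ++ i)
        else acc) =
        (fun acc b => acc ++
          (if pvEntry matrix b index ≠ 0 then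
            (mutateGoA cs matrix fuel (index + 1)).map (fun i => b.toList ++ i)
          else [])) := by
      funext acc b; split <;> simp
    rw [hfn, PySem.List.foldl_append_eq_flatMap, List.nil_append, pvOpts, if_pos hc,
      flatMap_filter_map]
  · rw [if_neg hc, pvOpts, if_neg hc]
    simp

lemma mutateGoA_last (cs : List Char) (matrix : List (String × List Int)) (fuel : Nat)
    (index : Int) (h : index = (cs.length : Int) - 1) :
    mutateGoA cs matrix (fuel + 1) index = pvOpts cs matrix index := by
  rw [mutateGoA, if_pos h, pvOpts]

lemma go_eq (cs : List Char) (matrix : List (String × List Int)) :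
    ∀ (k fuel : Nat), k ≤ fuel → 1 ≤ k → ∀ (index : Int), index + k = (cs.length : Int) →
      ∀ results,
        mutateGoB cs matrix (PySem.List.pyRange index (cs.length : Int) 1) results =
          results.flatMap (fun r => (mutateGoA cs matrix fuel index).map (fun i => r ++ i)) := by
  intro k
  induction k with
  | zero => intro fuel _ hk; exact absurd hk (by omega)
  | succ k ih =>
    intro fuel hkf _ index hidx results
    obtain ⟨f, rfl⟩ : ∃ f, fuel = f + 1 := ⟨fuel - 1, by omega⟩
    have hlt : index < (cs.length : Int) := by omega
    rw [PySem.List.pyRange_one_cons hlt, mutateGoB]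
    by_cases hk0 : k = 0
    · subst hk0
      have hidx' : index = (cs.length : Int) - 1 := by omega
      rw [PySem.List.pyRange_one_eq_nil (by omega), mutateGoA_last cs matrix f index hidx']
      have hX : results.flatMap (fun r =>
          ((if (PySem.List.pyGet? cs index).getD '?' = 'n' then
              (pvBases.filter (fun b => pvEntry matrix b index ≠ 0)).map String.toList
            else [(PySem.List.pyGet? cs index).getD '?' :: []]) : List (List Char)).map
              (fun o => r ++ o)) =
          results.flatMap (fun r => (pvOpts cs matrix index).map (fun i => r ++ i)) := rfl
      rw [hX]
      split
      · next h => rw [← h]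
      · rw [mutateGoB]
    · have hstep := mutateGoA_step cs matrix f index (by omega)
      rw [hstep]
      have hX : results.flatMap (fun r =>
          ((if (PySem.List.pyGet? cs index).getD '?' = 'n' then
              (pvBases.filter (fun b => pvEntry matrix b index ≠ 0)).map String.toList
            else [(PySem.List.pyGet? cs index).getD '?' :: []]) : List (List Char)).map
              (fun o => r ++ o)) =
          results.flatMap (fun r => (pvOpts cs matrix index).map (fun o => r ++ o)) := rfl
      rw [hX]
      split
      · next h =>
        rw [← flatMap_expand results (pvOpts cs matrix index)
          (mutateGoA cs matrix f (index + 1)), h]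
        simp
      · rw [ih f (by omega) (by omega) (index + 1) (by omega), flatMap_expand]

-- ===== VERDICT (by name: the statement is the Claim_ definition above) =====
theorem mutate_kmer_spec : Claim_equal_mutate_kmer := by
  intro pattern matrix index _ hpre
  obtain ⟨hne, hlo, hhi, _⟩ := hpre
  have hL : 0 < pattern.toList.length := List.length_pos_of_ne_nil hne
  show mutate_kmer pattern matrix index = mutate_kmer_alt pattern matrix index
  rw [mutate_kmer, mutate_kmer_alt,
    go_eq pattern.toList matrix (((pattern.toList.length : Int) - index).toNat)
      ((((pattern.toList.length : Int) - index)).toNat + 1) (by omega) (by omega) index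
      (by omega) [[]]]
  simp
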